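-- pv_equiv track=rewrite | github.com/jiayuanz3/swebench_memory | swebench_memory/harness/new_languages/full_validation_multilingual_java.py | _test_in_filter
-- ===== SOURCE A (Python) =====
-- def _test_in_filter(test_name: str, filter_set: set) -> bool:
--     """Check if test matches any pattern in filter set"""
--     if test_name in filter_set:
--         return True
--
--     test_parts = test_name.split('.')
--     test_method = test_parts[-1] if test_parts else test_name
--
--     for pattern in filter_set:
--         pattern_parts = pattern.split('.')
--         pattern_method = pattern_parts[-1] if pattern_parts else pattern
--
--         if test_method == pattern_method:
--             if len(test_parts) >= 2 and len(pattern_parts) >= 2: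
--                 if test_parts[-2] == pattern_parts[-2]:
--                     return True
--             else:
--                 return True
--
--     return False
-- ===== SOURCE B (Python) =====
-- def _test_in_filter(test_name: str, filter_set: set) -> bool:
--     """Check if test matches any pattern in filter set"""
--     index = {}
--     for pattern in filter_set:
--         parts = pattern.split('.')
--         method = parts[-1]
--         flag, parents = index.get(method, (False, set()))
--         if len(parts) >= 2:
--             parents.add(parts[-2])
--             index[method] = (flag, parents)
--         else:
--             index[method] = (True, parents)
--     t_parts = test_name.split('.')
--     entry = index.get(t_parts[-1])
--     if entry is None:
--         return False
--     if len(t_parts) < 2: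
--         return True
--     flag, parents = entry
--     return flag or t_parts[-2] in parents
-- ===== Notes on version B (the rewrite author's own statement) =====
-- stated objective: alternative
-- what changed: Replaces the per-query linear scan over every pattern with a method-name index: one pass builds a dict mapping each pattern's last dotted component to a no-parent flag plus the set of penultimate components, and the query is answered by a single dict lookup (the initial exact-membership check becomes redundant and is dropped).
import Mathlib
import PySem

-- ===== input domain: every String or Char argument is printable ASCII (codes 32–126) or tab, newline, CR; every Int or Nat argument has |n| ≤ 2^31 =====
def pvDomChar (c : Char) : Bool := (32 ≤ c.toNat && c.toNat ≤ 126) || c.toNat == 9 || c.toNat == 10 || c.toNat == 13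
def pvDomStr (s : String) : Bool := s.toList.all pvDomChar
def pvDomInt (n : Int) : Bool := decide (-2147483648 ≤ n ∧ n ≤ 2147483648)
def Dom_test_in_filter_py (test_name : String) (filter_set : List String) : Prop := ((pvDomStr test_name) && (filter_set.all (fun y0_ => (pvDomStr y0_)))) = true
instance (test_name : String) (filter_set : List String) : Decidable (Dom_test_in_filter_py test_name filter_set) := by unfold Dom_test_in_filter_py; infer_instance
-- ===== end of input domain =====

-- B replaces A's per-query linear scan over the patterns by a method-name index (a dict keyed by each
-- pattern's last dotted component) built in one pass and then a single lookup; both results are independent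
-- of the Python set's iteration order (A's scan only ORs matches; B's dict is only looked up afterwards),
-- so the List-of-distinct-elements model of the set is exact.

-- s.split('.') ; exact: the separator is nonempty, so Str.split? returns some
def pvSplitDot (s : String) : List String := (PySem.Str.split? s ".").getD []

-- ports `parts[-1] if parts else orig`; pyGetD is guarded by the nonemptiness test, so it is exact
def pvLastOr (parts : List String) (orig : String) : String :=
  if parts.isEmpty then orig else PySem.List.pyGetD parts (-1) orig

-- ===== PORT A =====
-- the `for pattern in filter_set:` loop with its early `return True`s
def aScan (test_parts : List String) (test_method : String) : List String → Bool
  | [] => false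
  | pattern :: rest =>
    let pattern_parts := pvSplitDot pattern
    let pattern_method := pvLastOr pattern_parts pattern
    if test_method == pattern_method then
      if 2 ≤ test_parts.length && 2 ≤ pattern_parts.length then
        -- xs[-2] is guarded by the length test, so pyGetD is exact
        if PySem.List.pyGetD test_parts (-2) "" == PySem.List.pyGetD pattern_parts (-2) "" then true
        else aScan test_parts test_method rest
      else true
    else aScan test_parts test_method rest

def test_in_filter_py (test_name : String) (filter_set : List String) : Bool :=
  if filter_set.contains test_name then true
  else
    let test_parts := pvSplitDot test_name
    let test_method := pvLastOr test_parts test_name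
    aScan test_parts test_method filter_set

-- ===== PORT B =====
-- one iteration of B's index-building loop (parts[-1] / parts[-2]: exact, split('.') never returns [],
-- and the [-2] access is guarded by the length test)
def bStep (d : PySem.Dict String (Bool × PySem.Set String)) (pattern : String) :
    PySem.Dict String (Bool × PySem.Set String) :=
  let parts := pvSplitDot pattern
  let method := PySem.List.pyGetD parts (-1) ""
  let e := (d.get? method).getD (false, PySem.Set.empty)
  if 2 ≤ parts.length then
    d.insert method (e.1, PySem.Set.add e.2 (PySem.List.pyGetD parts (-2) ""))
  else
    d.insert method (true, e.2)

def test_in_filter_py_alt (test_name : String) (filter_set : List String) : Bool :=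
  let index := filter_set.foldl bStep PySem.Dict.empty
  let t_parts := pvSplitDot test_name
  match index.get? (PySem.List.pyGetD t_parts (-1) "") with
  | none => false
  | some e =>
    if t_parts.length < 2 then true
    else e.1 || PySem.Set.contains e.2 (PySem.List.pyGetD t_parts (-2) "")

-- ===== PRECONDITION & SPEC =====
def Spec_test_in_filter_py (test_name : String) (filter_set : List String) (out : Bool) : Prop := out = test_in_filter_py_alt test_name filter_set
instance (test_name : String) (filter_set : List String) (out : Bool) : Decidable (Spec_test_in_filter_py test_name filter_set out) := by unfold Spec_test_in_filter_py; infer_instance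

-- ===== CLAIM (what is proved, stated in full; the proofs are below) =====
def Claim_equal_test_in_filter_py : Prop := ∀ (test_name : String) (filter_set : List String), Dom_test_in_filter_py test_name filter_set → Spec_test_in_filter_py test_name filter_set (test_in_filter_py test_name filter_set)

-- ===== LEMMAS AND PROOFS =====

theorem splitOn_go_ne_nil (sep : List Char) : ∀ (fuel : Nat) (l cur : List Char) (acc : List (List Char)),
    PySem.Chars.splitOn.go sep fuel l cur acc ≠ [] := by
  intro fuel
  induction fuel with
  | zero => intro l cur acc; cases l <;> simp [PySem.Chars.splitOn.go]
  | succ n ih =>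
    intro l cur acc
    cases l with
    | nil => simp [PySem.Chars.splitOn.go]
    | cons c rest =>
      rw [PySem.Chars.splitOn.go]
      split
      · exact ih _ _ _
      · exact ih _ _ _

theorem pvSplitDot_ne_nil (s : String) : pvSplitDot s ≠ [] := by
  simp [pvSplitDot, PySem.Str.split?, PySem.Chars.split?, PySem.Chars.splitOn]
  intro h
  exact splitOn_go_ne_nil _ _ _ _ _ h

-- the per-pattern match condition of A's loop body, as one Boolean
def matchA (test_name pattern : String) : Bool :=
  let tp := pvSplitDot test_name
  let pp := pvSplitDot pattern
  (PySem.List.pyGetD tp (-1) "" == PySem.List.pyGetD pp (-1) "") &&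
    (decide (tp.length < 2) || decide (pp.length < 2) ||
      (PySem.List.pyGetD tp (-2) "" == PySem.List.pyGetD pp (-2) ""))

-- B's query, abstracted over the dict
def bQuery (d : PySem.Dict String (Bool × PySem.Set String)) (test_name : String) : Bool :=
  let t_parts := pvSplitDot test_name
  match d.get? (PySem.List.pyGetD t_parts (-1) "") with
  | none => false
  | some e =>
    if t_parts.length < 2 then true
    else e.1 || PySem.Set.contains e.2 (PySem.List.pyGetD t_parts (-2) "")

theorem set_contains_add (s : PySem.Set String) (x y : String) :
    PySem.Set.contains (PySem.Set.add s x) y = ((y == x) || PySem.Set.contains s y) := by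
  simp only [PySem.Set.add, PySem.Set.contains]
  split
  · next h => cases hyx : (y == x) <;> simp_all
  · cases hyx : (y == x) <;> simp_all

theorem str_beq_eq_decide (a b : String) : (a == b) = decide (a = b) := by
  cases h : a == b <;> simp_all

theorem bQuery_bStep (d : PySem.Dict String (Bool × PySem.Set String)) (t p : String) :
    bQuery (bStep d p) t = (matchA t p || bQuery d t) := by
  simp only [bQuery, bStep, matchA]
  by_cases hmp : PySem.List.pyGetD (pvSplitDot t) (-1) "" = PySem.List.pyGetD (pvSplitDot p) (-1) ""
  · by_cases hpl : 2 ≤ (pvSplitDot p).length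
    · have hp1 : ¬ ((pvSplitDot p).length < 2) := by omega
      simp only [if_pos hpl, PySem.Dict.get?_insert, hmp]
      by_cases htl : (pvSplitDot t).length < 2
      · simp [htl]
      · cases hdt : d.get? (PySem.List.pyGetD (pvSplitDot p) (-1) "") with
        | none => simp [hdt, htl, hp1, set_contains_add, str_beq_eq_decide]
        | some e0 =>
          simp only [hdt, Option.getD_some, if_pos rfl, set_contains_add]
          simp [htl, hp1]
          cases e0.1 <;>
            cases h1 : decide (PySem.List.pyGetD (pvSplitDot t) (-2) "" = PySem.List.pyGetD (pvSplitDot p) (-2) "") <;>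
            cases h2 : decide (PySem.List.pyGetD (pvSplitDot t) (-2) "" ∈ e0.2) <;> simp_all
    · simp only [if_neg hpl, PySem.Dict.get?_insert, hmp]
      by_cases htl : (pvSplitDot t).length < 2
      · simp [htl]
      · simp [htl, hpl]; omega
  · have hbeq : (PySem.List.pyGetD (pvSplitDot t) (-1) "" == PySem.List.pyGetD (pvSplitDot p) (-1) "") = false := by
      simp [hmp]
    by_cases hpl : 2 ≤ (pvSplitDot p).length
    · simp only [if_pos hpl, PySem.Dict.get?_insert, if_neg hmp, hbeq]
      simp
    · simp only [if_neg hpl, PySem.Dict.get?_insert, if_neg hmp, hbeq]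
      simp

theorem pvLastOr_eq (parts : List String) (orig d : String) (h : parts ≠ []) :
    pvLastOr parts orig = PySem.List.pyGetD parts (-1) d := by
  rw [pvLastOr, if_neg (by simp [h]), PySem.List.pyGetD_neg_one _ _ h, PySem.List.pyGetD_neg_one _ _ h]

theorem aScan_eq_any (t : String) (l : List String) :
    aScan (pvSplitDot t) (pvLastOr (pvSplitDot t) t) l = l.any (matchA t) := by
  induction l with
  | nil => rfl
  | cons p rest ih =>
    rw [aScan, List.any_cons, ← ih]
    rw [pvLastOr_eq (pvSplitDot t) t "" (pvSplitDot_ne_nil t),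
        pvLastOr_eq (pvSplitDot p) p "" (pvSplitDot_ne_nil p)]
    simp only [matchA]
    by_cases hm : PySem.List.pyGetD (pvSplitDot t) (-1) "" = PySem.List.pyGetD (pvSplitDot p) (-1) ""
    · by_cases htl : 2 ≤ (pvSplitDot t).length <;> by_cases hpl : 2 ≤ (pvSplitDot p).length <;>
        · simp only [hm, htl, hpl, str_beq_eq_decide]
          cases h2 : decide (PySem.List.pyGetD (pvSplitDot t) (-2) "" = PySem.List.pyGetD (pvSplitDot p) (-2) "") <;>
            simp_all <;> omega
    · simp [hm, str_beq_eq_decide]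

theorem matchA_self (t : String) : matchA t t = true := by
  simp only [matchA]
  by_cases h : (pvSplitDot t).length < 2 <;> simp [h]

theorem bQuery_foldl (t : String) (l : List String) (d : PySem.Dict String (Bool × PySem.Set String)) :
    bQuery (l.foldl bStep d) t = (l.any (matchA t) || bQuery d t) := by
  induction l generalizing d with
  | nil => simp
  | cons p rest ih =>
    rw [List.foldl_cons, List.any_cons, ih, bQuery_bStep]
    cases matchA t p <;> simp

theorem alt_eq_any (t : String) (l : List String) :
    test_in_filter_py_alt t l = l.any (matchA t) := by
  have h : test_in_filter_py_alt t l = bQuery (l.foldl bStep PySem.Dict.empty) t := rfl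
  rw [h, bQuery_foldl]
  have he : bQuery PySem.Dict.empty t = false := by
    simp [bQuery, PySem.Dict.get?_empty]
  rw [he, Bool.or_false]

-- ===== VERDICT (by name: the statement is the Claim_ definition above) =====
theorem test_in_filter_py_spec : Claim_equal_test_in_filter_py := by
  intro t l _
  unfold Spec_test_in_filter_py
  rw [alt_eq_any, test_in_filter_py]
  split
  · next h =>
    have hm : t ∈ l := by simpa using h
    exact (List.any_eq_true.mpr ⟨t, hm, matchA_self t⟩).symm
  · exact aScan_eq_any t l
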